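-- pv_equiv track=rewrite | github.com/xgeorgio/edu | DNAerrors/src/dnaerrors.py | amino_to_codon
-- ===== SOURCE A (Python) =====
-- codon_amino = { "TTT": "Phe/F",  "TCT": "Ser/S",  "TAT": "Tyr/Y",  "TGT": "Cys/C",
--                 "TTC": "Phe/F",  "TCC": "Ser/S",  "TAC": "Tyr/Y",  "TGC": "Cys/C",
--                 "TTA": "Leu/L",  "TCA": "Ser/S",  "TAA": "Stop0",  "TGA": "Stop0",
--                 "TTG": "Leu/L",  "TCG": "Ser/S",  "TAG": "Stop0",  "TGG": "Trp/W",
--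
--                 "CTT": "Leu/L",  "CCT": "Pro/P",  "CAT": "His/H",  "CGT": "Arg/R",
--                 "CTC": "Leu/L",  "CCC": "Pro/P",  "CAC": "His/H",  "CGC": "Arg/R",
--                 "CTA": "Leu/L",  "CCA": "Pro/P",  "CAA": "Gin/Q",  "CGA": "Arg/R",
--                 "CTG": "Leu/L",  "CCG": "Pro/P",  "CAG": "Gin/Q",  "CGG": "Arg/R",
--
--                 "ATT": "Ile/I",  "ACT": "Thr/T",  "AAT": "Asn/N",  "AGT": "Ser/S",
--                 "ATC": "Ile/I",  "ACC": "Thr/T",  "AAC": "Asn/N",  "AGC": "Ser/S",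
--                 "ATA": "Ile/I",  "ACA": "Thr/T",  "AAA": "Lys/K",  "AGA": "Arg/R",
--                 "ATG": "Met/M",  "ACG": "Thr/T",  "AAG": "Lys/K",  "AGG": "Arg/R",
--
--                 "GTT": "Val/V",  "GCT": "Ala/A",  "GAT": "Asp/D",  "GGT": "Gly/G",
--                 "GTC": "Val/V",  "GCC": "Ala/A",  "GAC": "Asp/D",  "GGC": "Gly/G",
--                 "GTA": "Val/V",  "GCA": "Ala/A",  "GAA": "Glu/E",  "GGA": "Gly/G",
--                 "GTG": "Val/V",  "GCG": "Ala/A",  "GAG": "Glu/E",  "GGG": "Gly/G"  }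
--
-- def amino_to_codon( amino, isRNA=False ):
--     '''Amino/codon lookup wrapper with RNA conversions
--        amino : (string) protein label entry in table
--        isRNA=True : replace 'T' with 'U' after lookup
--        return : list of valid codons for given protein'''
--     if (amino in codon_amino.values()):
--         codons = []
--         for (k,v) in codon_amino.items():
--             if (v==amino):
--                 if (isRNA):
--                     k = k.replace('T','U')    # replacement for DNA -> RNA
--                 codons = codons + [k]
--         return (codons)
--     else:
--         return (None)
-- ===== SOURCE B (Python) =====
-- # Reverse lookup table written out once: amino label -> codons, in the order
-- # the forward codon table yields them.  One dict lookup per call, no scan.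
-- amino_codons = {
--     "Phe/F": ["TTT", "TTC"],
--     "Ser/S": ["TCT", "TCC", "TCA", "TCG", "AGT", "AGC"],
--     "Tyr/Y": ["TAT", "TAC"],
--     "Cys/C": ["TGT", "TGC"],
--     "Leu/L": ["TTA", "TTG", "CTT", "CTC", "CTA", "CTG"],
--     "Stop0": ["TAA", "TGA", "TAG"],
--     "Trp/W": ["TGG"],
--     "Pro/P": ["CCT", "CCC", "CCA", "CCG"],
--     "His/H": ["CAT", "CAC"],
--     "Arg/R": ["CGT", "CGC", "CGA", "CGG", "AGA", "AGG"],
--     "Gin/Q": ["CAA", "CAG"],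
--     "Ile/I": ["ATT", "ATC", "ATA"],
--     "Thr/T": ["ACT", "ACC", "ACA", "ACG"],
--     "Asn/N": ["AAT", "AAC"],
--     "Lys/K": ["AAA", "AAG"],
--     "Met/M": ["ATG"],
--     "Val/V": ["GTT", "GTC", "GTA", "GTG"],
--     "Ala/A": ["GCT", "GCC", "GCA", "GCG"],
--     "Asp/D": ["GAT", "GAC"],
--     "Gly/G": ["GGT", "GGC", "GGA", "GGG"],
--     "Glu/E": ["GAA", "GAG"],
-- }
--
-- def amino_to_codon( amino, isRNA=False ):
--     '''Amino/codon lookup wrapper with RNA conversions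
--        amino : (string) protein label entry in table
--        isRNA=True : replace 'T' with 'U' after lookup
--        return : list of valid codons for given protein'''
--     codons = amino_codons.get(amino)
--     if codons is None:
--         return None
--     if isRNA:
--         return [c.replace('T', 'U') for c in codons]
--     return list(codons)
-- ===== Notes on version B (the rewrite author's own statement) =====
-- stated objective: idiomatic
-- what changed: Replaces the per-call scan over dict.values() plus a full loop over codon_amino.items() by a precomputed literal reverse table (amino label -> codon list), so each call is one dict lookup plus an optional T->U map; no forward table is consulted at all.
import Mathlib
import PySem

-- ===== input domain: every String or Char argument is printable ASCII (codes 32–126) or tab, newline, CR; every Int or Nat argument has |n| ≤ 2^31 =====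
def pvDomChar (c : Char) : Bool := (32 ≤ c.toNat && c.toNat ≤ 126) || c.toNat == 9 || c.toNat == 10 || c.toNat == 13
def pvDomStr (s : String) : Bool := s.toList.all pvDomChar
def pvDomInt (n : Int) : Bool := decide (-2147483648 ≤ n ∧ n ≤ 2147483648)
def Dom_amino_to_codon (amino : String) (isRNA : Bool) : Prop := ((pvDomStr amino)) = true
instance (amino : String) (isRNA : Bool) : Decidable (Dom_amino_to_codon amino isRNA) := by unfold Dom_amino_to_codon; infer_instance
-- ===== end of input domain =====

-- B replaces A's per-call scans over the forward codon table by a single lookup in a precomputed literal reverse table; equivalence of the return value is proved below.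

-- ===== PORT A =====
-- A's module-level table codon_amino, in Python dict iteration (= insertion) order
def codonAminoList : List (String × String) := [
  ("TTT", "Phe/F"), ("TCT", "Ser/S"), ("TAT", "Tyr/Y"), ("TGT", "Cys/C"),
  ("TTC", "Phe/F"), ("TCC", "Ser/S"), ("TAC", "Tyr/Y"), ("TGC", "Cys/C"),
  ("TTA", "Leu/L"), ("TCA", "Ser/S"), ("TAA", "Stop0"), ("TGA", "Stop0"),
  ("TTG", "Leu/L"), ("TCG", "Ser/S"), ("TAG", "Stop0"), ("TGG", "Trp/W"),
  ("CTT", "Leu/L"), ("CCT", "Pro/P"), ("CAT", "His/H"), ("CGT", "Arg/R"),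
  ("CTC", "Leu/L"), ("CCC", "Pro/P"), ("CAC", "His/H"), ("CGC", "Arg/R"),
  ("CTA", "Leu/L"), ("CCA", "Pro/P"), ("CAA", "Gin/Q"), ("CGA", "Arg/R"),
  ("CTG", "Leu/L"), ("CCG", "Pro/P"), ("CAG", "Gin/Q"), ("CGG", "Arg/R"),
  ("ATT", "Ile/I"), ("ACT", "Thr/T"), ("AAT", "Asn/N"), ("AGT", "Ser/S"),
  ("ATC", "Ile/I"), ("ACC", "Thr/T"), ("AAC", "Asn/N"), ("AGC", "Ser/S"),
  ("ATA", "Ile/I"), ("ACA", "Thr/T"), ("AAA", "Lys/K"), ("AGA", "Arg/R"),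
  ("ATG", "Met/M"), ("ACG", "Thr/T"), ("AAG", "Lys/K"), ("AGG", "Arg/R"),
  ("GTT", "Val/V"), ("GCT", "Ala/A"), ("GAT", "Asp/D"), ("GGT", "Gly/G"),
  ("GTC", "Val/V"), ("GCC", "Ala/A"), ("GAC", "Asp/D"), ("GGC", "Gly/G"),
  ("GTA", "Val/V"), ("GCA", "Ala/A"), ("GAA", "Glu/E"), ("GGA", "Gly/G"),
  ("GTG", "Val/V"), ("GCG", "Ala/A"), ("GAG", "Glu/E"), ("GGG", "Gly/G") ]

def amino_to_codon (amino : String) (isRNA : Bool) : Option (List String) :=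
  if (codonAminoList.map Prod.snd).contains amino then
    some (codonAminoList.foldl (fun codons kv =>
      if kv.2 == amino then
        codons ++ [if isRNA then PySem.Str.replace kv.1 "T" "U" else kv.1]
      else codons) [])
  else
    none

-- ===== PORT B =====
-- Source B's literal reverse table amino_codons: amino label -> codons
def aminoCodons : PySem.Dict String (List String) := PySem.Dict.ofList [
  ("Phe/F", ["TTT", "TTC"]),
  ("Ser/S", ["TCT", "TCC", "TCA", "TCG", "AGT", "AGC"]),
  ("Tyr/Y", ["TAT", "TAC"]),
  ("Cys/C", ["TGT", "TGC"]),
  ("Leu/L", ["TTA", "TTG", "CTT", "CTC", "CTA", "CTG"]),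
  ("Stop0", ["TAA", "TGA", "TAG"]),
  ("Trp/W", ["TGG"]),
  ("Pro/P", ["CCT", "CCC", "CCA", "CCG"]),
  ("His/H", ["CAT", "CAC"]),
  ("Arg/R", ["CGT", "CGC", "CGA", "CGG", "AGA", "AGG"]),
  ("Gin/Q", ["CAA", "CAG"]),
  ("Ile/I", ["ATT", "ATC", "ATA"]),
  ("Thr/T", ["ACT", "ACC", "ACA", "ACG"]),
  ("Asn/N", ["AAT", "AAC"]),
  ("Lys/K", ["AAA", "AAG"]),
  ("Met/M", ["ATG"]),
  ("Val/V", ["GTT", "GTC", "GTA", "GTG"]),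
  ("Ala/A", ["GCT", "GCC", "GCA", "GCG"]),
  ("Asp/D", ["GAT", "GAC"]),
  ("Gly/G", ["GGT", "GGC", "GGA", "GGG"]),
  ("Glu/E", ["GAA", "GAG"]) ]

def amino_to_codon_alt (amino : String) (isRNA : Bool) : Option (List String) :=
  match aminoCodons.get? amino with
  | none => none
  | some cs => some (if isRNA then cs.map (fun c => PySem.Str.replace c "T" "U") else cs)

-- ===== PRECONDITION & SPEC =====
def Spec_amino_to_codon (amino : String) (isRNA : Bool) (out : Option (List String)) : Prop := out = amino_to_codon_alt amino isRNA
instance (amino : String) (isRNA : Bool) (out : Option (List String)) : Decidable (Spec_amino_to_codon amino isRNA out) := by unfold Spec_amino_to_codon; infer_instance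

-- ===== CLAIM (what is proved, stated in full; the proofs are below) =====
def Claim_equal_amino_to_codon : Prop := ∀ (amino : String) (isRNA : Bool), Dom_amino_to_codon amino isRNA → Spec_amino_to_codon amino isRNA (amino_to_codon amino isRNA)

-- ===== LEMMAS AND PROOFS =====

-- A's items() loop, grouped: lookup in the grouping fold = keys of the matching items
theorem get?_group_foldl (l : List (String × String)) (d : PySem.Dict String (List String)) (a : String) :
    ((l.foldl (fun d kv => d.modify kv.2 [] (fun cs => cs ++ [kv.1])) d).get? a) =
      if l.filter (fun kv => kv.2 == a) = [] then d.get? a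
      else some (d.getD a [] ++ (l.filter (fun kv => kv.2 == a)).map Prod.fst) := by
  induction l generalizing d with
  | nil => simp
  | cons kv rest ih =>
    obtain ⟨k, v⟩ := kv
    simp only [List.foldl_cons, ih, List.filter_cons]
    by_cases hv : v = a
    · subst hv
      simp only [PySem.Dict.modify, PySem.Dict.get?_insert_self, PySem.Dict.getD_insert_self,
        beq_self_eq_true, if_pos]
      by_cases hf : rest.filter (fun kv => kv.2 == v) = [] <;>
        simp [hf, List.append_assoc]
    · have hv' : (v == a) = false := by simp [hv]
      rw [hv']
      simp [PySem.Dict.modify, PySem.Dict.get?_insert, PySem.Dict.getD_insert, Ne.symm hv]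

theorem mem_snd_iff_filter_ne (l : List (String × String)) (a : String) :
    (l.map Prod.snd).contains a = true ↔ l.filter (fun kv => kv.2 == a) ≠ [] := by
  induction l with
  | nil => simp
  | cons kv rest ih =>
    by_cases h : kv.2 = a
    · simp [h]
    · simp [h, Ne.symm h]

-- B's literal reverse table IS the grouping of A's forward table (checked by evaluation)
set_option maxRecDepth 8192 in
theorem aminoCodons_eq_group :
    aminoCodons =
      codonAminoList.foldl (fun d kv => d.modify kv.2 [] (fun cs => cs ++ [kv.1]))
        PySem.Dict.empty := by decide

-- ===== VERDICT (by name: the statement is the Claim_ definition above) =====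
theorem amino_to_codon_spec : Claim_equal_amino_to_codon := by
  intro amino isRNA _
  unfold Spec_amino_to_codon amino_to_codon amino_to_codon_alt
  rw [aminoCodons_eq_group, get?_group_foldl]
  by_cases hf : codonAminoList.filter (fun kv => kv.2 == amino) = []
  · have hc : (codonAminoList.map Prod.snd).contains amino = false := by
      cases hcon : (codonAminoList.map Prod.snd).contains amino
      · rfl
      · exact absurd hf ((mem_snd_iff_filter_ne _ _).mp hcon)
    rw [hc]
    simp [hf]
  · have hc : (codonAminoList.map Prod.snd).contains amino = true :=
      (mem_snd_iff_filter_ne _ _).mpr hf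
    rw [PySem.List.foldl_append_if]
    simp only [hf, if_false, hc, if_true, PySem.Dict.get?_empty, PySem.Dict.getD_empty,
      List.nil_append]
    cases isRNA <;> simp [List.map_map, Function.comp]
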